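-- pv_equiv track=rewrite | github.com/manoj5070/Leetcode_Solutions | 2174-next-greater-numerically-balanced-number/next-greater-numerically-balanced-number.py | solve
-- ===== SOURCE A (Python) =====
-- def solve(a:int) -> int:
--     map={}
--     while(a>0):
--         rem=a%10
--         a//=10
--         map[rem]=map.get(rem,0)+1
--
--     for k,v in map.items():
--         if k!=v:
--             return False
--
--     return True
-- ===== SOURCE B (Python) =====
-- def solve(a: int) -> int:
--     # Sort the decimal digits, then scan runs: each maximal run of a digit d
--     # must have length exactly d.
--     def check(ds):
--         if not ds:
--             return True
--         k = 0
--         while k < len(ds) and ds[k] == ds[0]: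
--             k += 1
--         return k == int(ds[0]) and check(ds[k:])
--     return check(sorted(str(a))) if a > 0 else True
-- ===== Notes on version B (the rewrite author's own statement) =====
-- stated objective: alternative
-- what changed: Replaces A's divmod loop building a digit-frequency dictionary with a sort-then-scan: sort the digits of str(a) and recursively check that each maximal run of a digit d has length exactly d.
import Mathlib
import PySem

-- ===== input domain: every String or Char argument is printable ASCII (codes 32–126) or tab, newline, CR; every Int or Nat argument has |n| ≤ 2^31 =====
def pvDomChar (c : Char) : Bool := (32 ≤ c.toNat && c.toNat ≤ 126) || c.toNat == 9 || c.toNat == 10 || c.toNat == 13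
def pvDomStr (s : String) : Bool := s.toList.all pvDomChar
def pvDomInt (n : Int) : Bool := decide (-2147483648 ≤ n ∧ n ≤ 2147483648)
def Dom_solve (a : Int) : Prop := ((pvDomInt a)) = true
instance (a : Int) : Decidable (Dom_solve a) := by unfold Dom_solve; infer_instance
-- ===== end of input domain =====

-- B sorts the digits of str(a) and scans runs (each maximal run of digit d must have
-- length d) instead of A's divmod loop into a frequency dict; same return values.

-- ===== PORT A =====
-- while a > 0: rem = a % 10; a //= 10; map[rem] = map.get(rem, 0) + 1
def solveLoop (a : Int) (m : PySem.Dict Int Int) : PySem.Dict Int Int :=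
  if 0 < a then
    let rem := PySem.Int.mod a 10
    solveLoop (PySem.Int.floordiv a 10) (m.insert rem (m.getD rem 0 + 1))
  else m
termination_by a.toNat
decreasing_by
  simp only [PySem.Int.floordiv_eq_ediv_of_pos (show (0:Int) < 10 by omega)]
  omega

-- 'for k,v in map.items(): if k != v: return False' then 'return True' = all items satisfy k = v
def solve (a : Int) : Bool :=
  (solveLoop a PySem.Dict.empty).items.all (fun kv => kv.1 == kv.2)

-- ===== PORT B =====
-- inner while loop: k = 0; while k < len(ds) and ds[k] == ds[0]: k += 1
def runLen (c : Char) : List Char → Nat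
  | [] => 0
  | x :: xs => if x == c then runLen c xs + 1 else 0

theorem runLen_head_pos (c : Char) (xs : List Char) : 0 < runLen c (c :: xs) := by
  simp [runLen]

-- def check(ds): if not ds: return True; …; return k == int(ds[0]) and check(ds[k:])
def check : List Char → Bool
  | [] => true
  | d :: rest =>
    let k := runLen d (d :: rest)
    (some ((k : Nat) : Int) == PySem.Int.ofChars? [d]) && check ((d :: rest).drop k)
termination_by ds => ds.length
decreasing_by
  simp only [List.length_drop, List.length_cons]
  have := runLen_head_pos d rest
  omega

-- return check(sorted(str(a))) if a > 0 else True
def solve_alt (a : Int) : Bool :=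
  if 0 < a then check (PySem.List.sorted (PySem.Int.toStr a).toList (fun x => x) false)
  else true

-- ===== PRECONDITION & SPEC =====
def Spec_solve (a : Int) (out : Bool) : Prop := out = solve_alt a
instance (a : Int) (out : Bool) : Decidable (Spec_solve a out) := by unfold Spec_solve; infer_instance

-- ===== CLAIM (what is proved, stated in full; the proofs are below) =====
def Claim_equal_solve : Prop := ∀ (a : Int), Dom_solve a → Spec_solve a (solve a)

-- ===== LEMMAS AND PROOFS =====

-- A's divmod loop is the counting fold over the (little-endian) decimal digits of n.
theorem solveLoop_eq_foldl (n : Nat) :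
    ∀ m : PySem.Dict Int Int,
      solveLoop (n : Int) m =
        ((Nat.digits 10 n).map (fun d : Nat => (d : Int))).foldl
          (fun d x => d.insert x (d.getD x 0 + 1)) m := by
  induction n using Nat.strong_induction_on with
  | _ n ih =>
    intro m
    rcases Nat.eq_zero_or_pos n with h0 | hpos
    · subst h0
      rw [solveLoop]
      simp
    · rw [solveLoop]
      have h10 : PySem.Int.floordiv (n : Int) 10 = ((n / 10 : Nat) : Int) := by
        exact_mod_cast PySem.Int.floordiv_natCast n 10
      have hm : PySem.Int.mod (n : Int) 10 = ((n % 10 : Nat) : Int) := by simp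
      rw [if_pos (by exact_mod_cast hpos), hm, h10,
        ih (n / 10) (Nat.div_lt_self hpos (by norm_num)),
        Nat.digits_def' (by norm_num : (1:Nat) < 10) hpos]
      simp

-- Nat.toDigits (str(n) for n > 0) is the reversed digitChar image of Nat.digits.
theorem toDigitsCore_eq (f : Nat) :
    ∀ n l, 0 < n → n ≤ f →
      Nat.toDigitsCore 10 f n l = ((Nat.digits 10 n).map Nat.digitChar).reverse ++ l := by
  induction f with
  | zero => intro n l hn hf; omega
  | succ f ih =>
    intro n l hn _
    rw [Nat.toDigitsCore]
    by_cases hdiv : n / 10 = 0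
    · have hlt : n < 10 := by omega
      rw [if_pos hdiv, Nat.digits_def' (by norm_num : (1:Nat) < 10) hn, hdiv]
      simp
    · rw [if_neg hdiv, ih (n / 10) _ (by omega) (by omega),
        Nat.digits_def' (by norm_num : (1:Nat) < 10) hn]
      simp

theorem toDigits_eq (n : Nat) (hn : 0 < n) :
    Nat.toDigits 10 n = ((Nat.digits 10 n).map Nat.digitChar).reverse := by
  rw [Nat.toDigits, toDigitsCore_eq (n + 1) n [] hn (by omega)]
  simp

theorem ofChars_digitChar (d : Nat) (hd : d < 10) :
    PySem.Int.ofChars? [Nat.digitChar d] = some (d : Int) := by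
  interval_cases d <;> decide

theorem digitChar_inj : ∀ e < 10, ∀ d < 10, Nat.digitChar e = Nat.digitChar d → e = d := by
  decide

theorem count_digitChar (L : List Nat) (hL : ∀ e ∈ L, e < 10) (d : Nat) (hd : d < 10) :
    (L.map Nat.digitChar).count (Nat.digitChar d) = L.count d := by
  rw [show (L.map Nat.digitChar).count (Nat.digitChar d)
        = L.countP (fun a => Nat.digitChar a == Nat.digitChar d) by
      simp [List.count, List.countP_map, Function.comp_def]]
  rw [List.count, List.countP_congr]
  intro e he
  have he10 := hL e he
  constructor
  · intro h
    have := digitChar_inj e he10 d hd (by simpa using h)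
    simp [this]
  · intro h
    simp [show e = d by simpa using h]

-- run-length structure of runLen
theorem runLen_eq_takeWhile (c : Char) (xs : List Char) :
    runLen c xs = (xs.takeWhile (fun x => x == c)).length := by
  induction xs with
  | nil => rfl
  | cons x t ih => by_cases h : x = c <;> simp [runLen, h, ih]

theorem drop_runLen (c : Char) (xs : List Char) :
    xs.drop (runLen c xs) = xs.dropWhile (fun x => x == c) := by
  rw [runLen_eq_takeWhile]
  nth_rewrite 2 [← List.takeWhile_append_dropWhile (p := fun x => x == c) (l := xs)]
  rw [List.drop_left]

theorem mem_takeWhile_eq (c : Char) (xs : List Char) :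
    ∀ y ∈ xs.takeWhile (fun x => x == c), y = c := by
  intro y hy
  simpa using List.mem_takeWhile_imp hy

theorem sorted_not_mem_dropWhile (c : Char) :
    ∀ xs : List Char, xs.Pairwise (· ≤ ·) → (∀ y ∈ xs, c ≤ y) →
      c ∉ xs.dropWhile (fun x => x == c) := by
  intro xs
  induction xs with
  | nil => simp
  | cons x t ih =>
    intro h hc
    by_cases hx : x = c
    · subst hx
      rw [List.dropWhile_cons_of_pos (by simp)]
      exact ih h.of_cons (fun y hy => hc y (List.mem_cons_of_mem _ hy))
    · rw [List.dropWhile_cons_of_neg (by simp [hx])]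
      intro hmem
      rcases List.mem_cons.mp hmem with h1 | h2
      · exact hx h1.symm
      · have hxc : x ≤ c := (List.pairwise_cons.mp h).1 c h2
        have hcx : c ≤ x := hc x (List.mem_cons_self)
        exact hx (le_antisymm hxc hcx)

-- on a sorted list whose elements are all ≥ c, the leading run is the whole count of c
theorem sorted_count_eq_runLen (c : Char) (xs : List Char) (h : xs.Pairwise (· ≤ ·))
    (hc : ∀ y ∈ xs, c ≤ y) : xs.count c = runLen c xs := by
  conv_lhs => rw [← List.takeWhile_append_dropWhile (p := fun x => x == c) (l := xs)]
  rw [List.count_append, runLen_eq_takeWhile,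
    List.count_eq_length.mpr (fun y hy => (mem_takeWhile_eq c xs y hy).symm),
    List.count_eq_zero.mpr (sorted_not_mem_dropWhile c xs h hc)]
  omega

theorem count_drop_runLen (c c' : Char) (xs : List Char) (hne : c' ≠ c) :
    (xs.drop (runLen c xs)).count c' = xs.count c' := by
  rw [drop_runLen]
  conv_rhs => rw [← List.takeWhile_append_dropWhile (p := fun x => x == c) (l := xs)]
  rw [List.count_append,
    List.count_eq_zero.mpr (fun hmem => hne (mem_takeWhile_eq c xs c' hmem))]
  omega

theorem mem_drop_runLen_of_ne (c c' : Char) (xs : List Char) (h : c' ∈ xs)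
    (hne : c' ≠ c) : c' ∈ xs.drop (runLen c xs) := by
  rw [drop_runLen]
  rw [← List.takeWhile_append_dropWhile (p := fun x => x == c) (l := xs), List.mem_append] at h
  rcases h with h1 | h2
  · exact absurd (mem_takeWhile_eq c xs c' h1) hne
  · exact h2

-- the run-length scan on a sorted list checks digit = its multiplicity
theorem check_iff_aux (n : Nat) :
    ∀ L : List Char, L.length ≤ n → L.Pairwise (· ≤ ·) →
      (check L = true ↔
        ∀ c ∈ L, PySem.Int.ofChars? [c] = some ((L.count c : Nat) : Int)) := by
  induction n with
  | zero =>
    intro L hL _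
    have : L = [] := List.length_eq_zero_iff.mp (Nat.le_zero.mp hL)
    subst this
    simp [check]
  | succ n ih =>
    intro L hL hp
    match L, hL, hp with
    | [], _, _ => simp [check]
    | d :: rest, hL, hp =>
      have hhead : ∀ y ∈ d :: rest, d ≤ y := by
        intro y hy
        rcases List.mem_cons.mp hy with rfl | hy'
        · exact le_refl _
        · exact (List.pairwise_cons.mp hp).1 y hy'
      have hkpos := runLen_head_pos d rest
      have hcnt : (d :: rest).count d = runLen d (d :: rest) :=
        sorted_count_eq_runLen d _ hp hhead
      have hT_sorted : ((d :: rest).drop (runLen d (d :: rest))).Pairwise (· ≤ ·) :=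
        hp.sublist (List.drop_sublist _ _)
      have hT_len : ((d :: rest).drop (runLen d (d :: rest))).length ≤ n := by
        simp only [List.length_drop, List.length_cons] at *
        omega
      have hdT : d ∉ (d :: rest).drop (runLen d (d :: rest)) := by
        rw [drop_runLen]
        exact sorted_not_mem_dropWhile d _ hp hhead
      rw [check]
      simp only [Bool.and_eq_true, ih _ hT_len hT_sorted, beq_iff_eq]
      constructor
      · rintro ⟨h1, h2⟩ c hc
        by_cases hcd : c = d
        · subst hcd
          rw [hcnt]
          exact h1.symm
        · have hcT := h2 c (mem_drop_runLen_of_ne d c _ hc hcd)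
          rwa [count_drop_runLen d c _ hcd] at hcT
      · intro h
        refine ⟨?_, ?_⟩
        · have := h d List.mem_cons_self
          rw [hcnt] at this
          exact this.symm
        · intro c hc
          have hcd : c ≠ d := fun he => hdT (he ▸ hc)
          rw [count_drop_runLen d c _ hcd]
          exact h c (List.drop_subset _ _ hc)

theorem main_pos (n : Nat) (hn : 0 < n) : solve (n : Int) = solve_alt (n : Int) := by
  have hL : ∀ d ∈ Nat.digits 10 n, d < 10 :=
    fun d hd => Nat.digits_lt_base (by norm_num) hd
  have hA : solve (n : Int) =
      (PySem.Set.ofList ((Nat.digits 10 n).map (fun d : Nat => (d : Int)))).all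
        (fun k => k == (((Nat.digits 10 n).map (fun d : Nat => (d : Int))).count k : Int)) := by
    rw [solve, solveLoop_eq_foldl, PySem.Dict.foldl_insert_getD_add_one_eq_counter,
      PySem.Dict.items_counter, List.all_map]
    rfl
  have hpos : (0:Int) < (n : Int) := by exact_mod_cast hn
  have hchars : (PySem.Int.toStr (n : Int)).toList
      = ((Nat.digits 10 n).map Nat.digitChar).reverse := by
    rw [PySem.Int.toList_toStr]
    simp [PySem.Int.toChars, toDigits_eq n hn]
  have hB : solve_alt (n : Int) =
      check (PySem.List.sorted (((Nat.digits 10 n).map Nat.digitChar).reverse)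
        (fun x => x) false) := by
    rw [solve_alt, if_pos hpos, hchars]
  have hperm : (PySem.List.sorted (((Nat.digits 10 n).map Nat.digitChar).reverse)
      (fun x => x) false).Perm (((Nat.digits 10 n).map Nat.digitChar).reverse) :=
    PySem.List.sorted_perm _ _ _
  have hpair : (PySem.List.sorted (((Nat.digits 10 n).map Nat.digitChar).reverse)
      (fun x => x) false).Pairwise (· ≤ ·) :=
    PySem.List.sorted_pairwise _ _
  have hcntz : ∀ d : Nat,
      ((Nat.digits 10 n).map (fun e : Nat => (e : Int))).count (d : Int)
        = (Nat.digits 10 n).count d := by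
    intro d
    simpa using List.count_map_of_injective (Nat.digits 10 n)
      (fun e : Nat => (e : Int)) CharZero.cast_injective d
  rw [hA, hB, Bool.eq_iff_iff, List.all_eq_true,
    check_iff_aux (PySem.List.sorted (((Nat.digits 10 n).map Nat.digitChar).reverse)
      (fun x => x) false).length _ le_rfl hpair]
  constructor
  · intro h c hc
    rw [hperm.mem_iff, List.mem_reverse, List.mem_map] at hc
    obtain ⟨d, hdL, rfl⟩ := hc
    have hd10 := hL d hdL
    have hfd := h (d : Int)
      (by rw [PySem.Set.mem_ofList]; exact List.mem_map_of_mem (f := fun e : Nat => (e : Int)) hdL)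
    rw [hcntz d] at hfd
    have hdc : d = (Nat.digits 10 n).count d := by
      have := of_decide_eq_true (by simpa using hfd)
      exact_mod_cast this
    rw [ofChars_digitChar d hd10, hperm.count_eq, List.count_reverse,
      count_digitChar _ hL d hd10]
    simp [← hdc]
  · intro h k hk
    rw [PySem.Set.mem_ofList, List.mem_map] at hk
    obtain ⟨d, hdL, rfl⟩ := hk
    have hd10 := hL d hdL
    have hgd := h (Nat.digitChar d)
      (by rw [hperm.mem_iff, List.mem_reverse]
          exact List.mem_map_of_mem (f := Nat.digitChar) hdL)
    rw [ofChars_digitChar d hd10, hperm.count_eq, List.count_reverse,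
      count_digitChar _ hL d hd10] at hgd
    have hdc : d = (Nat.digits 10 n).count d := by
      have := Option.some.inj hgd
      exact_mod_cast this
    rw [hcntz d]
    simp [← hdc]

-- ===== VERDICT (by name: the statement is the Claim_ definition above) =====
theorem solve_spec : Claim_equal_solve := by
  intro a _
  unfold Spec_solve
  by_cases h : a ≤ 0
  · rw [show solve a = true by
        unfold solve solveLoop
        simp [not_lt.mpr h, PySem.Dict.empty]]
    simp [solve_alt, not_lt.mpr h]
  · have hpos : 0 < a := by omega
    have : a = ((a.toNat : Nat) : Int) := by omega
    rw [this, main_pos a.toNat (by omega)]
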